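-- pv_equiv track=rewrite | github.com/frankwirgit/leet_code | leet_m_level.py | f807
-- ===== SOURCE A (Python) =====
-- def f807(grid):
--     max_row = [max(row) for row in grid]
--     max_col = [max(col) for col in zip(*grid)]
--     res  =0
--     for i, row in enumerate(grid):
--         for j, h in enumerate(row):
--             res += min(max_row[i], max_col[j]) - h
--     return res
-- ===== SOURCE B (Python) =====
-- def f807(grid):
--     max_row = [max(row) for row in grid]
--     max_col = [max(col) for col in zip(*grid)]
--     total = sum(map(sum, grid))
--     # sum of min(r, c) over all (r, c) pairs via a sorted two-pointer merge:
--     # walk the sorted row maxima; keep a pointer into the sorted column maxima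
--     # together with the running sum of the columns already passed (those <= r).
--     sr = sorted(max_row)
--     sc = sorted(max_col)
--     m = len(sc)
--     s = 0
--     j = 0
--     acc = 0          # sum of sc[:j], all <= current r
--     for r in sr:
--         while j < m and sc[j] <= r:
--             acc += sc[j]
--             j += 1
--         s += acc + r * (m - j)
--     return s - total
-- ===== Notes on version B (the rewrite author's own statement) =====
-- stated objective: faster
-- what changed: B replaces A's per-cell double loop of min(max_row[i], max_col[j]) lookups by a sort-then-merge aggregate: it sorts the row maxima and column maxima, computes the sum of min over all (r,c) pairs with a two-pointer merge and a running prefix sum in O((n+m) log(n+m)), and subtracts the plain grid total.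
import Mathlib
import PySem

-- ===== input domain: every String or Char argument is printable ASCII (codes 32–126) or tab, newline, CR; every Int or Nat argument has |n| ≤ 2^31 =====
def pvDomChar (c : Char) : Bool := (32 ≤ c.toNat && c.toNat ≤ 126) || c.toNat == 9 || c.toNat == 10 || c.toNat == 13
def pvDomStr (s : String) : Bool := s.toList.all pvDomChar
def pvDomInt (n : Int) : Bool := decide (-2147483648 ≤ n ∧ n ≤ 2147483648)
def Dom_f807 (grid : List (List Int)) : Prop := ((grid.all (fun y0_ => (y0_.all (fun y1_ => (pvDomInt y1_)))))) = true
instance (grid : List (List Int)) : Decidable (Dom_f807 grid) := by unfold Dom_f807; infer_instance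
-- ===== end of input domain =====

-- B replaces A's per-cell double loop by a sort-then-merge aggregate: it sorts the row and
-- column maxima and computes the sum of min over all pairs with a two-pointer merge and a
-- running prefix sum, then subtracts the grid total (objective: faster; a timing run measured B faster).

-- ===== PORT A =====
-- termination measure lemma for pvZipStar (cited in its decreasing_by)
lemma pvZipStar_dec (grid : List (List Int)) (hne : grid ≠ []) (hall : ∀ r ∈ grid, r ≠ []) :
    ((grid.map List.tail).map List.length).sum < (grid.map List.length).sum := by
  cases grid with
  | nil => exact absurd rfl hne
  | cons g t =>
      simp only [List.map_cons, List.sum_cons, List.map_map]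
      have h1 : g.tail.length < g.length := by
        cases g with
        | nil => exact absurd rfl (hall _ (by simp))
        | cons x xs => simp
      have h2 : (t.map (List.length ∘ List.tail)).sum ≤ (t.map List.length).sum := by
        apply List.sum_le_sum; intro r _; simp [List.length_tail]
      omega

-- zip(*grid): take heads while every row is nonempty (exact for zip of list iterators)
def pvZipStar (grid : List (List Int)) : List (List Int) :=
  if h : grid ≠ [] ∧ ∀ r ∈ grid, r ≠ [] then
    (grid.map (fun r => r.headD 0)) :: pvZipStar (grid.map List.tail)
  else []
termination_by (grid.map List.length).sum
decreasing_by
  simpa using pvZipStar_dec grid h.1 h.2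

-- max(row) ported as max? (first maximum); .getD 0 only totalises the empty case, which Pre_ excludes
def f807 (grid : List (List Int)) : Int :=
  let max_row := grid.map (fun row => (PySem.List.max? row (fun x => x)).getD 0)
  let max_col := (pvZipStar grid).map (fun col => (PySem.List.max? col (fun x => x)).getD 0)
  (PySem.List.enumerate grid).foldl (fun res p =>
    (PySem.List.enumerate p.2).foldl (fun res q =>
      res + (min (PySem.List.pyGetD max_row p.1 0) (PySem.List.pyGetD max_col q.1 0) - q.2)) res) 0

-- ===== PORT B =====
-- the inner 'while j < m and sc[j] <= r' of Source B: the index j into sc is represented by the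
-- suffix sc[j:] (rest) and acc is the running sum of the elements passed; returns (new suffix, new acc)
def pvAdvance (r : Int) : List Int → Int → (List Int × Int)
  | [], acc => ([], acc)
  | c :: rest, acc => if c ≤ r then pvAdvance r rest (acc + c) else (c :: rest, acc)

def f807_alt (grid : List (List Int)) : Int :=
  let max_row := grid.map (fun row => (PySem.List.max? row (fun x => x)).getD 0)
  let max_col := (pvZipStar grid).map (fun col => (PySem.List.max? col (fun x => x)).getD 0)
  let total := (grid.map (fun row => row.sum)).sum
  let sr := PySem.List.sorted max_row (fun x => x)
  let sc := PySem.List.sorted max_col (fun x => x)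
  -- state (s, rest, acc): s the accumulated answer, rest = sc[j:], acc = sum(sc[:j])
  let st := sr.foldl (fun (st : Int × List Int × Int) r =>
      let res := pvAdvance r st.2.1 st.2.2
      (st.1 + res.2 + r * (res.1.length : Int), res.1, res.2)) (0, sc, 0)
  st.1 - total

-- ===== PRECONDITION & SPEC =====
-- Pre_ excludes exactly the inputs on which A raises: a grid with an empty row (ValueError from
-- Python max of an empty sequence) or a ragged grid (IndexError indexing max_col past the zip-truncated width).
def Pre_f807 (grid : List (List Int)) : Prop :=
  ∀ row ∈ grid, row ≠ [] ∧ row.length = (grid.headD []).length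
instance (grid : List (List Int)) : Decidable (Pre_f807 grid) := by unfold Pre_f807; infer_instance
def pvWitness_f807 : List (List Int) := [[1, 2], [3, 4]]

def Spec_f807 (grid : List (List Int)) (out : Int) : Prop := out = f807_alt grid
instance (grid : List (List Int)) (out : Int) : Decidable (Spec_f807 grid out) := by unfold Spec_f807; infer_instance

-- ===== CLAIM (what is proved, stated in full; the proofs are below) =====
def Claim_equal_f807 : Prop := ∀ (grid : List (List Int)), Dom_f807 grid → Pre_f807 grid → Spec_f807 grid (f807 grid)

-- ===== LEMMAS AND PROOFS =====

lemma sum_map_sub {α : Type} (l : List α) (f g : α → Int) :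
    (l.map (fun x => f x - g x)).sum = (l.map f).sum - (l.map g).sum := by
  induction l with
  | nil => simp
  | cons x xs ih => simp [ih]; ring

lemma pvZipStar_length (n : Nat) : ∀ (grid : List (List Int)), grid ≠ [] →
    (∀ r ∈ grid, r.length = n) → (pvZipStar grid).length = n := by
  induction n with
  | zero =>
      intro grid hne hlen
      rw [pvZipStar]
      rw [dif_neg]
      · rfl
      · rintro ⟨-, hall⟩
        cases grid with
        | nil => exact hne rfl
        | cons g t =>
            have : g.length = 0 := hlen g (by simp)
            exact hall g (by simp) (List.eq_nil_of_length_eq_zero this)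
  | succ m ih =>
      intro grid hne hlen
      rw [pvZipStar]
      rw [dif_pos]
      · simp only [List.length_cons]
        have : (pvZipStar (grid.map List.tail)).length = m := by
          apply ih
          · simpa using hne
          · intro r hr
            obtain ⟨r₀, hr₀, rfl⟩ := List.mem_map.mp hr
            have := hlen r₀ hr₀
            simp [List.length_tail, this]
        omega
      · refine ⟨hne, ?_⟩
        intro r hr
        have := hlen r hr
        intro h
        rw [h] at this
        simp at this

-- per-row rewrite of A's inner loop sum
lemma inner_row (a : Int) (row mc : List Int) (hlen : row.length = mc.length) :
    ((PySem.List.enumerate row).map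
        (fun q => min a (PySem.List.pyGetD mc q.1 0) - q.2)).sum
      = (mc.map (fun c => min a c)).sum - row.sum := by
  have hsplit :
      ((PySem.List.enumerate row).map
          (fun q => min a (PySem.List.pyGetD mc q.1 0) - q.2)).sum
        = ((PySem.List.enumerate row).map
              (fun q => min a (PySem.List.pyGetD mc q.1 0))).sum
          - ((PySem.List.enumerate row).map (fun q => q.2)).sum := by
    simpa using sum_map_sub (PySem.List.enumerate row)
      (fun q => min a (PySem.List.pyGetD mc q.1 0)) (fun q => q.2)
  rw [hsplit, PySem.List.map_snd_enumerate]
  congr 1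
  have h1 : ((PySem.List.enumerate row).map
      (fun q => min a (PySem.List.pyGetD mc q.1 0)))
      = ((PySem.List.enumerate row).map (fun q => q.1)).map
          (fun j => min a (PySem.List.pyGetD mc j 0)) := by
    rw [List.map_map]; rfl
  rw [h1, PySem.List.map_fst_enumerate]
  have h2 : (PySem.List.pyRange 0 (0 + (row.length : Int)) 1).map
      (fun j => min a (PySem.List.pyGetD mc j 0))
      = ((PySem.List.pyRange 0 (0 + (row.length : Int)) 1).map
          (fun j => PySem.List.pyGetD mc j 0)).map (fun c => min a c) := by
    rw [List.map_map]; rfl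
  rw [h2]
  have h3 : (0 + (row.length : Int)) = PySem.List.len mc := by
    simp [PySem.List.len, hlen]
  rw [h3, PySem.List.map_pyGetD_pyRange_zero]

-- A's nested fold equals the double sum of min minus the grid total
lemma fA_eq (grid : List (List Int)) (hpre : Pre_f807 grid) :
    f807 grid
      = ((grid.map (fun row => (PySem.List.max? row (fun x => x)).getD 0)).map (fun r =>
          (((pvZipStar grid).map (fun col => (PySem.List.max? col (fun x => x)).getD 0)).map
            (fun c => min r c)).sum)).sum
        - (grid.map (fun row => row.sum)).sum := by
  unfold f807
  simp only []
  set maxf : List Int → Int := fun row => (PySem.List.max? row (fun x => x)).getD 0 with hmaxf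
  set mr := grid.map maxf with hmr
  set mc := (pvZipStar grid).map maxf with hmc
  have hrlen : ∀ row ∈ grid, row.length = mc.length := by
    intro row hrow
    have hne : grid ≠ [] := List.ne_nil_of_mem hrow
    have hzl : (pvZipStar grid).length = (grid.headD []).length := by
      apply pvZipStar_length _ _ hne
      intro r hr; exact (hpre r hr).2
    rw [hmc, List.length_map, hzl]
    exact (hpre row hrow).2
  simp only [PySem.List.foldl_add]
  simp only [zero_add]
  have hcong : ∀ p ∈ PySem.List.enumerate grid,
      ((PySem.List.enumerate p.2).map
        (fun q => min (PySem.List.pyGetD mr p.1 0) (PySem.List.pyGetD mc q.1 0) - q.2)).sum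
      = (mc.map (fun c => min (maxf p.2) c)).sum - p.2.sum := by
    intro p hp
    obtain ⟨k, hk, rfl⟩ := (PySem.List.mem_enumerate_iff _ _ _).mp hp
    have hmrk : PySem.List.pyGetD mr ((0:Int) + (k:Int)) 0 = maxf grid[k] := by
      have h0 : ((0:Int) + (k:Int)) = (k : Int) := by ring
      rw [h0, PySem.List.pyGetD_natCast]
      rw [hmr]
      rw [List.getD_eq_getElem _ _ (by simpa using hk)]
      simp
    rw [hmrk]
    exact inner_row (maxf grid[k]) grid[k] mc (hrlen _ (by simp))
  rw [List.map_congr_left hcong]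
  have hmap : (PySem.List.enumerate grid).map
      (fun p => (mc.map (fun c => min (maxf p.2) c)).sum - p.2.sum)
      = grid.map (fun row => (mc.map (fun c => min (maxf row) c)).sum - row.sum) := by
    have := PySem.List.map_snd_enumerate (xs := grid) (s := 0)
    calc (PySem.List.enumerate grid).map
          (fun p => (mc.map (fun c => min (maxf p.2) c)).sum - p.2.sum)
        = ((PySem.List.enumerate grid).map (fun p => p.2)).map
            (fun row => (mc.map (fun c => min (maxf row) c)).sum - row.sum) := by
          rw [List.map_map]; rfl
      _ = grid.map (fun row => (mc.map (fun c => min (maxf row) c)).sum - row.sum) := by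
          rw [this]
  rw [hmap, sum_map_sub]
  rw [hmr, List.map_map]
  rfl

-- the while loop: on a sorted suffix it splits off exactly the elements ≤ r and adds them to acc
lemma pvAdvance_spec (r : Int) : ∀ (rest : List Int) (acc : Int),
    rest.Pairwise (· ≤ ·) →
    ∃ taken, rest = taken ++ (pvAdvance r rest acc).1 ∧ (∀ x ∈ taken, x ≤ r) ∧
      (∀ x ∈ (pvAdvance r rest acc).1, r < x) ∧ (pvAdvance r rest acc).2 = acc + taken.sum
  | [], acc, _ => ⟨[], by simp [pvAdvance]⟩
  | c :: rest, acc, hp => by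
      rw [List.pairwise_cons] at hp
      by_cases hc : c ≤ r
      · obtain ⟨taken, h1, h2, h3, h4⟩ := pvAdvance_spec r rest (acc + c) hp.2
        refine ⟨c :: taken, ?_, ?_, ?_, ?_⟩
        · simp [pvAdvance, hc]; exact h1
        · intro x hx; rcases List.mem_cons.mp hx with rfl | hx
          · exact hc
          · exact h2 x hx
        · intro x hx; simp only [pvAdvance, if_pos hc] at hx ⊢; exact h3 x hx
        · simp only [pvAdvance, if_pos hc]; rw [h4]; simp; ring
      · refine ⟨[], by simp [pvAdvance, hc], by simp, ?_, by simp [pvAdvance, hc]⟩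
        intro x hx
        simp only [pvAdvance, if_neg hc] at hx
        rcases List.mem_cons.mp hx with rfl | hx
        · omega
        · have := hp.1 x hx; omega

-- the merge loop invariant: sc = done ++ rest, acc = done.sum, all of done ≤ every upcoming r
lemma merge_loop : ∀ (sr done rest : List Int) (s0 : Int),
    sr.Pairwise (· ≤ ·) → rest.Pairwise (· ≤ ·) →
    (∀ r ∈ sr, ∀ x ∈ done, x ≤ r) →
    (sr.foldl (fun (st : Int × List Int × Int) r =>
        let res := pvAdvance r st.2.1 st.2.2
        (st.1 + res.2 + r * (res.1.length : Int), res.1, res.2)) (s0, rest, done.sum)).1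
      = s0 + (sr.map (fun r => ((done ++ rest).map (fun c => min r c)).sum)).sum
  | [], done, rest, s0, _, _, _ => by simp
  | r :: sr, done, rest, s0, hsr, hrest, hdone => by
      rw [List.pairwise_cons] at hsr
      obtain ⟨taken, h1, h2, h3, h4⟩ := pvAdvance_spec r rest done.sum hrest
      simp only [List.foldl_cons]
      set rest' := (pvAdvance r rest done.sum).1 with hrest'
      have hrest'p : rest'.Pairwise (· ≤ ·) := by
        rw [h1] at hrest
        exact (List.pairwise_append.mp hrest).2.1
      have hdone' : ∀ r2 ∈ sr, ∀ x ∈ done ++ taken, x ≤ r2 := by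
        intro r2 hr2 x hx
        rcases List.mem_append.mp hx with hx | hx
        · exact hdone r2 (by simp [hr2]) x hx
        · exact le_trans (h2 x hx) (hsr.1 r2 hr2)
      have hsum : (pvAdvance r rest done.sum).2 = (done ++ taken).sum := by
        rw [h4]; simp
      have key := merge_loop sr (done ++ taken) rest'
          (s0 + (pvAdvance r rest done.sum).2 + r * (rest'.length : Int))
          hsr.2 hrest'p hdone'
      rw [hsum] at key
      have e1 : ((done ++ taken).map (fun c => min r c)).sum = (done ++ taken).sum := by
        have : (done ++ taken).map (fun c => min r c) = (done ++ taken).map id := by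
          apply List.map_congr_left
          intro x hx
          have hxr : x ≤ r := by
            rcases List.mem_append.mp hx with hx | hx
            · exact hdone r (by simp) x hx
            · exact h2 x hx
          simp [min_eq_right hxr]
        rw [this, List.map_id]
      have e2 : (rest'.map (fun c => min r c)).sum = r * (rest'.length : Int) := by
        have : rest'.map (fun c => min r c) = rest'.map (fun _ => r) := by
          apply List.map_congr_left
          intro x hx
          have := h3 x hx
          simp [min_eq_left (le_of_lt this)]
        rw [this]
        induction rest' with
        | nil => simp
        | cons y ys ih => simp at ih ⊢; rw [ih]; ring
      have hcontrib : ((done ++ taken ++ rest').map (fun c => min r c)).sum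
          = (done ++ taken).sum + r * (rest'.length : Int) := by
        calc ((done ++ taken ++ rest').map (fun c => min r c)).sum
            = ((done ++ taken).map (fun c => min r c)).sum
              + (rest'.map (fun c => min r c)).sum := by
              rw [List.map_append, List.sum_append]
          _ = (done ++ taken).sum + r * (rest'.length : Int) := by rw [e1, e2]
      have hsp : done ++ rest = done ++ taken ++ rest' := by
        rw [h1, List.append_assoc]
      simp only [] at key ⊢
      rw [hsum, key, List.map_cons, List.sum_cons, hsp, hcontrib]
      ring

-- B's merge equals the double sum of min minus the grid total
lemma fB_eq (grid : List (List Int)) :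
    f807_alt grid
      = ((grid.map (fun row => (PySem.List.max? row (fun x => x)).getD 0)).map (fun r =>
          (((pvZipStar grid).map (fun col => (PySem.List.max? col (fun x => x)).getD 0)).map
            (fun c => min r c)).sum)).sum
        - (grid.map (fun row => row.sum)).sum := by
  unfold f807_alt
  simp only []
  set mr := grid.map (fun row => (PySem.List.max? row (fun x => x)).getD 0) with hmr
  set mc := (pvZipStar grid).map (fun col => (PySem.List.max? col (fun x => x)).getD 0) with hmc
  set sr := PySem.List.sorted mr (fun x => x) with hsr
  set sc := PySem.List.sorted mc (fun x => x) with hsc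
  congr 1
  have hloop := merge_loop sr [] sc 0
    (by simpa using PySem.List.sorted_pairwise (xs := mr) (key := fun x => x))
    (by simpa using PySem.List.sorted_pairwise (xs := mc) (key := fun x => x))
    (by intro r _ x hx; simp at hx)
  simp only [List.nil_append, List.sum_nil] at hloop
  rw [hloop, zero_add]
  -- replace the sorted lists by the originals: sums are permutation invariant
  have hscperm : sc.Perm mc := PySem.List.sorted_perm mc (fun x => x) false
  have hinner : ∀ r : Int, ((sc.map (fun c => min r c)).sum) = ((mc.map (fun c => min r c)).sum) :=
    fun r => (hscperm.map (fun c => min r c)).sum_eq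
  calc (sr.map (fun r => (sc.map (fun c => min r c)).sum)).sum
      = (sr.map (fun r => (mc.map (fun c => min r c)).sum)).sum := by
        exact congrArg List.sum (List.map_congr_left (fun r _ => hinner r))
    _ = (mr.map (fun r => (mc.map (fun c => min r c)).sum)).sum :=
        (((PySem.List.sorted_perm mr (fun x => x) false)).map _).sum_eq

-- ===== VERDICT (by name: the statement is the Claim_ definition above) =====
theorem f807_spec : Claim_equal_f807 := by
  intro grid _ hpre
  unfold Spec_f807
  rw [fA_eq grid hpre, fB_eq grid]
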